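-- pv_equiv track=rewrite | github.com/troublemakerMibu/SmartLandscapeEval | data_processing/score_calculator.py | _extract_impact_level
-- ===== SOURCE A (Python) =====
-- def _extract_impact_level(case_text: str) -> str:
--     """从案例文本中提取影响程度等级"""
--     if not case_text:
--         return ''
--
--     # 案例格式: "类型,影响程度"
--     # 例如: "a) 专业技术类（如解决复杂植物问题）,a) 轻微正面影响"
--
--     # 简单方法：查找最后出现的 a) b) c) d)
--     case_lower = case_text.lower()
--
--     # 从后往前查找，找到第一个匹配的就返回
--     for i in range(len(case_lower) - 1, -1, -1):
--         if i > 0 and case_lower[i] == ')':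
--             if case_lower[i - 1] in ['a', 'b', 'c', 'd']:
--                 return case_lower[i - 1]
--
--     return ''
-- ===== SOURCE B (Python) =====
-- import re
--
-- def _extract_impact_level(case_text: str) -> str:
--     """Same result via one forward regex pass: collect every '<letter>)' match, take the last."""
--     matches = re.findall(r'[abcd]\)', case_text.lower())
--     return matches[-1][0] if matches else ''
-- ===== Notes on version B (the rewrite author's own statement) =====
-- stated objective: faster
-- what changed: Replaces the backward character-by-character Python scan with one forward re.findall pass collecting every letter-then-paren match and returning the first character of the last one.
import Mathlib
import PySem

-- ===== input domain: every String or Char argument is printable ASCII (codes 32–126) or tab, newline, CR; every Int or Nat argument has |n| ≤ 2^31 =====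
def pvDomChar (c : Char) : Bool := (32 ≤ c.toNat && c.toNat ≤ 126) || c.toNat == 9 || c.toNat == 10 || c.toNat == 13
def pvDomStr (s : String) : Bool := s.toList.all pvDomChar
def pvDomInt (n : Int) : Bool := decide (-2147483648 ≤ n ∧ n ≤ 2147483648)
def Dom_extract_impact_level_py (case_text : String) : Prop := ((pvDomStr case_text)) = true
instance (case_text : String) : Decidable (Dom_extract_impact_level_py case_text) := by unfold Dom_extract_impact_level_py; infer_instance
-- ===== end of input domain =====

-- B replaces A's backward character scan with one forward pass collecting all '<letter>)' matches and taking the last (idiomatic regex style).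

-- ===== PORT A =====
-- A's backward loop: for i in range(len-1, -1, -1), return case_lower[i-1] at the
-- first ')' whose predecessor is in ['a','b','c','d']; recursion on the index i.
def extract_impact_level_py_loop (cs : List Char) : Nat → String
  | 0 => ""   -- at i = 0 the guard 'i > 0' fails and the loop ends, returning ''
  | k + 1 =>
    if cs.getD (k + 1) ' ' = ')' then
      if cs.getD k ' ' = 'a' ∨ cs.getD k ' ' = 'b' ∨ cs.getD k ' ' = 'c' ∨ cs.getD k ' ' = 'd' then
        String.mk [cs.getD k ' ']
      else extract_impact_level_py_loop cs k
    else extract_impact_level_py_loop cs k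

def extract_impact_level_py (case_text : String) : String :=
  if case_text = "" then ""
  else
    let case_lower := (PySem.Str.lower case_text).toList
    extract_impact_level_py_loop case_lower (case_lower.length - 1)

-- ===== PORT B =====
-- re.findall(r'[abcd]\)', …): forward non-overlapping scan; each 2-char match is
-- determined by its first character, which is what B's matches[-1][0] extracts.
def extract_impact_level_py_findall (cs : List Char) : List Char :=
  match cs with
  | c1 :: c2 :: rest =>
    if (c1 = 'a' ∨ c1 = 'b' ∨ c1 = 'c' ∨ c1 = 'd') ∧ c2 = ')' then
      c1 :: extract_impact_level_py_findall rest          -- regex resumes after the match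
    else extract_impact_level_py_findall (c2 :: rest)
  | _ => []

def extract_impact_level_py_alt (case_text : String) : String :=
  let ms := extract_impact_level_py_findall (PySem.Str.lower case_text).toList
  match ms.getLast? with
  | some c => String.mk [c]   -- matches[-1][0]
  | none => ""                -- '' if no match

-- ===== PRECONDITION & SPEC =====
def Spec_extract_impact_level_py (case_text : String) (out : String) : Prop := out = extract_impact_level_py_alt case_text
instance (case_text : String) (out : String) : Decidable (Spec_extract_impact_level_py case_text out) := by unfold Spec_extract_impact_level_py; infer_instance

-- ===== CLAIM (what is proved, stated in full; the proofs are below) =====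
def Claim_equal_extract_impact_level_py : Prop := ∀ (case_text : String), Dom_extract_impact_level_py case_text → Spec_extract_impact_level_py case_text (extract_impact_level_py case_text)

-- ===== LEMMAS AND PROOFS =====

-- the last match in cs among pairs (k, k+1) with k + 1 ≤ i, as an Option Char
def lastMatchUpTo (cs : List Char) : Nat → Option Char
  | 0 => none
  | k + 1 =>
    if cs.getD (k + 1) ' ' = ')' ∧
       (cs.getD k ' ' = 'a' ∨ cs.getD k ' ' = 'b' ∨ cs.getD k ' ' = 'c' ∨ cs.getD k ' ' = 'd') then
      some (cs.getD k ' ')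
    else lastMatchUpTo cs k

def strOfOpt : Option Char → String
  | some c => String.mk [c]
  | none => ""

theorem loop_eq_lastMatch (cs : List Char) (i : Nat) :
    extract_impact_level_py_loop cs i = strOfOpt (lastMatchUpTo cs i) := by
  induction i with
  | zero => rfl
  | succ k ih =>
    have hL : extract_impact_level_py_loop cs (k + 1) =
        (if cs.getD (k + 1) ' ' = ')' then
          if cs.getD k ' ' = 'a' ∨ cs.getD k ' ' = 'b' ∨ cs.getD k ' ' = 'c' ∨ cs.getD k ' ' = 'd' then
            String.mk [cs.getD k ' ']
          else extract_impact_level_py_loop cs k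
        else extract_impact_level_py_loop cs k) := rfl
    have hR : lastMatchUpTo cs (k + 1) =
        (if cs.getD (k + 1) ' ' = ')' ∧
            (cs.getD k ' ' = 'a' ∨ cs.getD k ' ' = 'b' ∨ cs.getD k ' ' = 'c' ∨ cs.getD k ' ' = 'd') then
          some (cs.getD k ' ')
        else lastMatchUpTo cs k) := rfl
    rw [hL, hR, ih]
    split_ifs <;> simp_all [strOfOpt]

theorem lastMatch_cons (c : Char) (cs : List Char) (i : Nat) :
    lastMatchUpTo (c :: cs) (i + 1) =
      match lastMatchUpTo cs i with
      | some x => some x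
      | none =>
        if cs.getD 0 ' ' = ')' ∧ (c = 'a' ∨ c = 'b' ∨ c = 'c' ∨ c = 'd') then some c
        else none := by
  induction i with
  | zero => simp [lastMatchUpTo]
  | succ k ih =>
    have hL : lastMatchUpTo (c :: cs) (k + 1 + 1) =
        (if (c :: cs).getD (k + 1 + 1) ' ' = ')' ∧
            ((c :: cs).getD (k + 1) ' ' = 'a' ∨ (c :: cs).getD (k + 1) ' ' = 'b' ∨
             (c :: cs).getD (k + 1) ' ' = 'c' ∨ (c :: cs).getD (k + 1) ' ' = 'd') then
          some ((c :: cs).getD (k + 1) ' ')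
        else lastMatchUpTo (c :: cs) (k + 1)) := rfl
    have hR : lastMatchUpTo cs (k + 1) =
        (if cs.getD (k + 1) ' ' = ')' ∧
            (cs.getD k ' ' = 'a' ∨ cs.getD k ' ' = 'b' ∨ cs.getD k ' ' = 'c' ∨ cs.getD k ' ' = 'd') then
          some (cs.getD k ' ')
        else lastMatchUpTo cs k) := rfl
    rw [hL, hR, ih]
    simp only [List.getD_cons_succ]
    split_ifs <;> rfl

-- the last match over the whole list
def lastMatch (cs : List Char) : Option Char := lastMatchUpTo cs (cs.length - 1)

theorem lastMatch_cons_cons (c1 c2 : Char) (rest : List Char) :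
    lastMatch (c1 :: c2 :: rest) =
      match lastMatch (c2 :: rest) with
      | some x => some x
      | none =>
        if c2 = ')' ∧ (c1 = 'a' ∨ c1 = 'b' ∨ c1 = 'c' ∨ c1 = 'd') then some c1
        else none := by
  have h := lastMatch_cons c1 (c2 :: rest) ((c2 :: rest).length - 1)
  simp only [lastMatch, List.length_cons, Nat.add_sub_cancel] at *
  simpa using h

theorem getLast?_cons (a : Char) (l : List Char) :
    (a :: l).getLast? = match l.getLast? with | some x => some x | none => some a := by
  induction l with
  | nil => simp
  | cons b t _ =>
    rw [List.getLast?_cons_cons]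
    cases h : (b :: t).getLast? with
    | some x => simp [h]
    | none => simp at h

theorem findall_getLast (cs : List Char) :
    (extract_impact_level_py_findall cs).getLast? = lastMatch cs := by
  induction cs using extract_impact_level_py_findall.induct with
  | case1 c1 c2 rest hm ih =>
    rw [extract_impact_level_py_findall, if_pos hm, getLast?_cons, ih, lastMatch_cons_cons]
    obtain ⟨hc1, hc2⟩ := hm
    subst hc2
    -- ')' cannot be a match's first character, so the head of ')' :: rest never matches
    cases hrest : rest with
    | nil => simp [lastMatch, lastMatchUpTo]; tauto
    | cons r t =>
      have h2 := lastMatch_cons_cons ')' r t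
      cases h : lastMatch (r :: t) with
      | some x => simp [h2, h]
      | none =>
        rw [h] at h2; simp at h2
        simp [h2]; tauto
  | case2 c1 c2 rest hm ih =>
    rw [extract_impact_level_py_findall, if_neg hm, ih, lastMatch_cons_cons]
    cases h : lastMatch (c2 :: rest) with
    | some x => simp [h]
    | none =>
      have hnm : ¬ (c2 = ')' ∧ (c1 = 'a' ∨ c1 = 'b' ∨ c1 = 'c' ∨ c1 = 'd')) := by tauto
      simp [hnm]
  | case3 x h =>
    cases x with
    | nil => rfl
    | cons a t =>
      cases t with
      | nil => rfl
      | cons b u => exact (h a b u rfl).elim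

-- ===== VERDICT (by name: the statement is the Claim_ definition above) =====
theorem extract_impact_level_py_spec : Claim_equal_extract_impact_level_py := by
  intro s _
  show extract_impact_level_py s = extract_impact_level_py_alt s
  unfold extract_impact_level_py extract_impact_level_py_alt
  simp only [findall_getLast]
  by_cases hs : s = ""
  · subst hs
    simp [PySem.Str.lower, PySem.Chars.lower, lastMatch, lastMatchUpTo]
  · rw [if_neg hs, loop_eq_lastMatch]
    cases h : lastMatch (PySem.Str.lower s).toList with
    | some c => simp [lastMatch] at h; simp [h, strOfOpt]
    | none => simp [lastMatch] at h; simp [h, strOfOpt]
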